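-- pv_equiv track=rewrite | github.com/demartinoj/pythonTraining | 15_setsOfLove.py | love_meet
-- ===== SOURCE A (Python) =====
-- def love_meet(bob, alice):
--     bobset = set(bob) #set of bob districts
--     aliceset = set(alice) #set of alice districts
--     crossPaths = set() #creates an empty set
--     for i in bobset: #for each item in bobset
--         for j in aliceset: #for each item in aliceset
--             if i == j: #if item from bobset = item from alice set:
--                 crossPaths.add(j) #add item to crossPaths set
--             else: #otherwise pass
--                 pass
--     return crossPaths #return crossPaths set
-- ===== SOURCE B (Python) =====
-- def love_meet(bob, alice):
--     aliceset = set(alice)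
--     return {x for x in set(bob) if x in aliceset}
-- ===== Notes on version B (the rewrite author's own statement) =====
-- stated objective: simpler
-- what changed: Replaces A's nested double loop over both sets with a single-pass set comprehension over set(bob) filtered by constant-time membership in set(alice).
import Mathlib
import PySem

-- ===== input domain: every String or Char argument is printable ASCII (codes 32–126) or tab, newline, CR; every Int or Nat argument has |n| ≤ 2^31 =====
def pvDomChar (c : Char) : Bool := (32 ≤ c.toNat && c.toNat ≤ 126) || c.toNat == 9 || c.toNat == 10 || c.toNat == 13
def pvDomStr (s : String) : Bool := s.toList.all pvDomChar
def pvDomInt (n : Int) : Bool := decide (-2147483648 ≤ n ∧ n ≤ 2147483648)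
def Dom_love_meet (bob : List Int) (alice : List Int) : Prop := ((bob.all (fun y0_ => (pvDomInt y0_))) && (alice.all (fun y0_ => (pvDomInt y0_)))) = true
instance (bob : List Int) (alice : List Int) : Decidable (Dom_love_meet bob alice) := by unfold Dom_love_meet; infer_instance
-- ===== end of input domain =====

-- B replaces A's nested double loop over both sets with one filtered pass over set(bob): simpler, asymptotically faster.
-- ===== PORT A =====
def love_meet (bob : List Int) (alice : List Int) : List Int :=
  let bobset := PySem.Set.ofList bob
  let aliceset := PySem.Set.ofList alice
  let crossPaths : PySem.Set Int := PySem.Set.empty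
  bobset.foldl (fun cross i =>
    aliceset.foldl (fun c j => if i == j then PySem.Set.add c j else c) cross) crossPaths

-- ===== PORT B =====
def love_meet_alt (bob : List Int) (alice : List Int) : List Int :=
  let aliceset := PySem.Set.ofList alice
  (PySem.Set.ofList bob).foldl
    (fun acc x => if PySem.Set.contains aliceset x then PySem.Set.add acc x else acc)
    PySem.Set.empty

-- ===== PRECONDITION & SPEC =====
def Spec_love_meet (bob : List Int) (alice : List Int) (out : List Int) : Prop := out = love_meet_alt bob alice
instance (bob : List Int) (alice : List Int) (out : List Int) : Decidable (Spec_love_meet bob alice out) := by unfold Spec_love_meet; infer_instance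

-- ===== CLAIM (what is proved, stated in full; the proofs are below) =====
def Claim_equal_love_meet : Prop := ∀ (bob : List Int) (alice : List Int), Dom_love_meet bob alice → Spec_love_meet bob alice (love_meet bob alice)

-- ===== LEMMAS AND PROOFS =====

-- A's inner loop over aliceset equals one membership-guarded add.
theorem inner_loop_eq (L : List Int) (cross : List Int) (i : Int) :
    L.foldl (fun c j => if i == j then PySem.Set.add c j else c) cross
      = if PySem.Set.contains L i then PySem.Set.add cross i else cross := by
  induction L generalizing cross with
  | nil => simp [PySem.Set.contains]
  | cons j rest ih =>
    simp only [List.foldl_cons]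
    by_cases h : i = j
    · subst h
      rw [ih, PySem.Set.add_of_mem (by simp [PySem.Set.mem_add])]
      simp [PySem.Set.contains]
    · have hb : (i == j) = false := by simp [h]
      rw [hb, if_neg (by simp)]
      rw [ih]
      simp [PySem.Set.contains, h]

-- ===== VERDICT (by name: the statement is the Claim_ definition above) =====
-- The two outer folds agree for any element list and any accumulator.
theorem outer_loop_eq (B aliceset : List Int) (acc : List Int) :
    B.foldl (fun cross i =>
        aliceset.foldl (fun c j => if i == j then PySem.Set.add c j else c) cross) acc
      = B.foldl
          (fun a x => if PySem.Set.contains aliceset x then PySem.Set.add a x else a) acc := by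
  simp only [inner_loop_eq]

theorem love_meet_spec : Claim_equal_love_meet := by
  intro bob alice _
  unfold Spec_love_meet love_meet love_meet_alt
  exact outer_loop_eq _ _ _
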